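-- pv_equiv track=rewrite | github.com/Modeuser/AdventOfCode | Day5/CrateSort.py | logToString
-- ===== SOURCE A (Python) =====
-- def logToString (content):
--     stackLog = ''
--     for stacks in range(len(content[0])):
--         # check if a value in row 9 is a number 1-9
--         if ord(content[8][stacks]) in range(48,58):
--             for crate in reversed(range(9)):
--                 # remove spaces
--                 if content[crate][stacks] != ' ':
--                     stackLog += content[crate][stacks]
--     # bad way to do this, but adding 10 to help with stackSorter
--     stackLog += '10'
--     return stackLog
-- ===== SOURCE B (Python) =====
-- def logToString(content):
--     # Build the result back-to-front: walk the columns right-to-left, prepending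
--     # each digit-marked column's crate string (computed by a recursive helper
--     # that descends the rows top-down and appends below itself) onto the output,
--     # which starts as the '10' sentinel.
--     def column(col, row):
--         if row > 8:
--             return ''
--         ch = content[row][col]
--         rest = column(col, row + 1)
--         return rest + ch if ch != ' ' else rest
--
--     out = '10'
--     for col in reversed(range(len(content[0]))):
--         if 48 <= ord(content[8][col]) <= 57:
--             out = column(col, 0) + out
--     return out
-- ===== Notes on version B (the rewrite author's own statement) =====
-- stated objective: alternative
-- what changed: B builds the output back-to-front: it walks the columns right-to-left with a prepend accumulator seeded with '10', and computes each digit-marked column's crate string with a recursive helper that descends the rows (recursion instead of A's inner loop, prepend instead of A's forward append).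
import Mathlib
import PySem

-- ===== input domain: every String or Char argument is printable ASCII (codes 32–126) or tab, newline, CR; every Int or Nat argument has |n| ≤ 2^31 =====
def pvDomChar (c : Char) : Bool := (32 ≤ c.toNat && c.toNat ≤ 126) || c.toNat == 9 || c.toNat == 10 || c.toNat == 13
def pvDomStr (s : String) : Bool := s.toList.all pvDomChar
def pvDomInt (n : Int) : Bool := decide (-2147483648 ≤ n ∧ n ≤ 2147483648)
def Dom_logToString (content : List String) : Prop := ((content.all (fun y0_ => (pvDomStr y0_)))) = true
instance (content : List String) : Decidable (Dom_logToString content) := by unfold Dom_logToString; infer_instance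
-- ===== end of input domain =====

-- B builds the answer back-to-front: it walks the columns right-to-left, prepending each
-- digit-marked column's crate string — computed by a recursive helper descending the rows —
-- onto the output, which starts as the '10' sentinel; same cost, different decomposition.

-- ===== PORT A =====
-- content[crate][stacks]; out-of-range default is never reached inside Pre_ (Python raises there)
def pvCellA (cs : List (List Char)) (r c : Nat) : Char := ((cs[r]?.getD [])[c]?.getD ' ')

def logToString (content : List String) : String :=
  let cs := content.map (·.toList)
  let log := (List.range (cs.headD []).length).foldl
    (fun log s =>
      if 48 ≤ (pvCellA cs 8 s).toNat ∧ (pvCellA cs 8 s).toNat < 58 then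
        ((List.range 9).reverse).foldl
          (fun log c => if pvCellA cs c s ≠ ' ' then log ++ [pvCellA cs c s] else log) log
      else log) []
  String.mk (log ++ ['1', '0'])

-- ===== PORT B =====
-- recursive helper `column` of Source B: the crate letters of one column, rows `row`..8, bottom first
def colChars (cs : List (List Char)) (col row : Nat) : List Char :=
  if row > 8 then []
  else
    let ch := (cs[row]?.getD [])[col]?.getD ' '
    let rest := colChars cs col (row + 1)
    if ch ≠ ' ' then rest ++ [ch] else rest
  termination_by 9 - row
  decreasing_by omega

def logToString_alt (content : List String) : String :=
  let cs := content.map (·.toList)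
  let out := ((List.range (cs.headD []).length).reverse).foldl
    (fun out col =>
      if 48 ≤ ((cs[8]?.getD [])[col]?.getD ' ').toNat ∧
         ((cs[8]?.getD [])[col]?.getD ' ').toNat < 58 then
        colChars cs col 0 ++ out
      else out) ['1', '0']
  String.mk out

-- ===== PRECONDITION & SPEC =====
-- Pre_ excludes exactly the inputs on which the Python A raises IndexError:
-- an empty list (content[0]), a row 8 that is missing or shorter than row 0, and, for a
-- digit-marked column, any of rows 0..8 too short to hold that column.
def Pre_logToString (content : List String) : Prop :=
  content ≠ [] ∧
  ∀ s ∈ List.range (content.headD "").toList.length,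
    (8 < content.length ∧ s < ((content.map (·.toList))[8]?.getD []).length) ∧
    ((48 ≤ (pvCellA (content.map (·.toList)) 8 s).toNat ∧
      (pvCellA (content.map (·.toList)) 8 s).toNat < 58) →
      ∀ r ∈ List.range 9, s < ((content.map (·.toList))[r]?.getD []).length)
instance (content : List String) : Decidable (Pre_logToString content) := by
  unfold Pre_logToString; infer_instance

def pvWitness_logToString : List String :=
  ["a", "b", " ", "d", "e", "f", "g", "h", "1"]

def Spec_logToString (content : List String) (out : String) : Prop := out = logToString_alt content
instance (content : List String) (out : String) : Decidable (Spec_logToString content out) := by unfold Spec_logToString; infer_instance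

-- ===== CLAIM (what is proved, stated in full; the proofs are below) =====
def Claim_equal_logToString : Prop := ∀ (content : List String), Dom_logToString content → Pre_logToString content → Spec_logToString content (logToString content)

-- ===== LEMMAS AND PROOFS =====

-- the recursive column helper produces exactly A's inner-loop block for rows row..8
lemma colChars_eq (cs : List (List Char)) (col : Nat) :
    ∀ n row, 9 - row = n →
      colChars cs col row
        = (((List.range' row (9 - row)).reverse).filter
            (fun r => decide (pvCellA cs r col ≠ ' '))).map (fun r => pvCellA cs r col) := by
  intro n
  induction n with
  | zero =>
    intro row h
    rw [colChars]
    simp [show row > 8 by omega, h]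
  | succ k ih =>
    intro row h
    rw [colChars]
    have hrow : ¬ row > 8 := by omega
    rw [h, List.range'_succ]
    simp only [hrow, if_false, List.reverse_cons, List.filter_append, List.map_append,
      List.filter_cons, List.filter_nil]
    have hk : 9 - (row + 1) = k := by omega
    rw [ih (row + 1) hk, hk]
    by_cases hch : (cs[row]?.getD [])[col]?.getD ' ' = ' '
    · simp [pvCellA, hch]
    · simp [pvCellA, hch]

-- folding right-to-left with prepend equals the filtered flatMap followed by the seed
lemma revfold_prepend (blk : Nat → List Char) (q : Nat → Prop) [DecidablePred q] :
    ∀ (l : List Nat) (init : List Char),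
      (l.reverse).foldl (fun out c => if q c then blk c ++ out else out) init
        = (l.filter (fun c => decide (q c))).flatMap blk ++ init := by
  intro l init
  rw [List.foldl_reverse]
  induction l with
  | nil => simp
  | cons c t ih =>
    by_cases hc : q c <;> simp [hc, ih, List.append_assoc]

lemma logToString_eq_alt (content : List String) :
    logToString content = logToString_alt content := by
  unfold logToString logToString_alt
  set cs := content.map (·.toList) with hcs
  set rows := (List.range 9).reverse with hrows
  have hblock : ∀ (log : List Char) (s : Nat),
      rows.foldl (fun log c => if pvCellA cs c s ≠ ' ' then log ++ [pvCellA cs c s] else log) log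
        = log ++ (rows.filter (fun c => decide (pvCellA cs c s ≠ ' '))).map
            (fun c => pvCellA cs c s) := fun log s =>
    PySem.List.foldl_append_ite (fun c => pvCellA cs c s ≠ ' ') (fun c => pvCellA cs c s) rows log
  -- A side: guard → filter, then each active column appends its block
  have hA : (List.range (cs.headD []).length).foldl
      (fun log s =>
        if 48 ≤ (pvCellA cs 8 s).toNat ∧ (pvCellA cs 8 s).toNat < 58 then
          rows.foldl (fun log c => if pvCellA cs c s ≠ ' ' then log ++ [pvCellA cs c s] else log) log
        else log) []
      = ((List.range (cs.headD []).length).filter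
          (fun s => decide (48 ≤ (pvCellA cs 8 s).toNat ∧ (pvCellA cs 8 s).toNat < 58))).flatMap
          (fun s => (rows.filter (fun c => decide (pvCellA cs c s ≠ ' '))).map
            (fun c => pvCellA cs c s)) := by
    rw [PySem.List.foldl_ite_eq_foldl_filter
          (p := fun s => 48 ≤ (pvCellA cs 8 s).toNat ∧ (pvCellA cs 8 s).toNat < 58)]
    rw [PySem.List.foldl_congr_mem _
          (fun log s => rows.foldl
            (fun log c => if pvCellA cs c s ≠ ' ' then log ++ [pvCellA cs c s] else log) log)
          (fun log s => log ++ (rows.filter (fun c => decide (pvCellA cs c s ≠ ' '))).map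
            (fun c => pvCellA cs c s)) []
          (fun acc x _ => hblock acc x)]
    rw [PySem.List.foldl_append_eq_flatMap]
    simp
  -- B side: the right-to-left prepend fold, with each column block named by colChars_eq
  have hB : ((List.range (cs.headD []).length).reverse).foldl
      (fun out col =>
        if 48 ≤ ((cs[8]?.getD [])[col]?.getD ' ').toNat ∧
           ((cs[8]?.getD [])[col]?.getD ' ').toNat < 58 then
          colChars cs col 0 ++ out
        else out) ['1', '0']
      = ((List.range (cs.headD []).length).filter
          (fun s => decide (48 ≤ (pvCellA cs 8 s).toNat ∧ (pvCellA cs 8 s).toNat < 58))).flatMap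
          (fun s => (rows.filter (fun c => decide (pvCellA cs c s ≠ ' '))).map
            (fun c => pvCellA cs c s)) ++ ['1', '0'] := by
    show ((List.range (cs.headD []).length).reverse).foldl
      (fun out col =>
        if 48 ≤ (pvCellA cs 8 col).toNat ∧ (pvCellA cs 8 col).toNat < 58 then
          colChars cs col 0 ++ out
        else out) ['1', '0'] = _
    rw [revfold_prepend (fun col => colChars cs col 0)
          (fun col => 48 ≤ (pvCellA cs 8 col).toNat ∧ (pvCellA cs 8 col).toNat < 58)]
    congr 1
    refine List.flatMap_congr (fun col _ => ?_)
    rw [colChars_eq cs col 9 0 rfl]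
    simp [hrows, List.range_eq_range']
  simp only [hA]
  rw [hB]

-- ===== VERDICT (by name: the statement is the Claim_ definition above) =====
theorem logToString_spec : Claim_equal_logToString := by
  intro content _ _
  unfold Spec_logToString
  exact logToString_eq_alt content
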